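-- pv_equiv track=rewrite | github.com/epoyraz/leetcode | solutions/2464.py | secondsToRemoveOccurrences
-- ===== SOURCE A (Python) =====
-- def secondsToRemoveOccurrences(s):
--     zeros = 0
--     max_time = 0
--
--     for c in s:
--         if c == '0':
--             zeros += 1
--         elif zeros > 0:
--             max_time = max(max_time + 1, zeros)
--
--     return max_time
-- ===== SOURCE B (Python) =====
-- def secondsToRemoveOccurrences(s):
--     total0 = 0
--     for c in s:
--         if c == '0':
--             total0 += 1
--     zright = 0
--     ones = 0
--     best = 0
--     for c in reversed(s):
--         if c == '0':
--             zright += 1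
--         else:
--             zb = total0 - zright
--             if zb > 0 and zb + ones > best:
--                 best = zb + ones
--             ones += 1
--     return best
-- ===== Notes on version B (the rewrite author's own statement) =====
-- stated objective: alternative
-- what changed: Replaces A's forward scan with a running max-recurrence by a zero-count pass plus a reversed scan that, for each non-zero character, combines the number of zeros before it with the count of ones already seen to its right and takes a plain maximum.
import Mathlib
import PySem

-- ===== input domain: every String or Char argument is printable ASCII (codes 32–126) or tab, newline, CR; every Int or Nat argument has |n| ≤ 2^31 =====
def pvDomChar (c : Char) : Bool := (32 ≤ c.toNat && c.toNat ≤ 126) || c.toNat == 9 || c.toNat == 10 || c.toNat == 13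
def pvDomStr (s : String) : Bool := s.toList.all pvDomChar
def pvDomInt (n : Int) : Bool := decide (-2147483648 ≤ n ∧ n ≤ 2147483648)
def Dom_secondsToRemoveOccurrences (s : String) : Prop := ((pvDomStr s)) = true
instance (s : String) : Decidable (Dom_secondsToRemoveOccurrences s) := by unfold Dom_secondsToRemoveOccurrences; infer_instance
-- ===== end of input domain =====

-- B replaces A's forward max-recurrence scan by a zero-count pass plus a reversed scan
-- (zeros-before plus ones-to-the-right maximum); same cost, different traversal (objective: alternative).

-- ===== PORT A =====
-- state = (zeros, max_time)
def pvStepA (st : Int × Int) (c : Char) : Int × Int :=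
  if c = '0' then (st.1 + 1, st.2)
  else if st.1 > 0 then (st.1, max (st.2 + 1) st.1)
  else st

def secondsToRemoveOccurrences (s : String) : Int :=
  (s.toList.foldl pvStepA (0, 0)).2

-- ===== PORT B =====
-- state = (zright, ones, best); total0 fixed from the first pass
def pvStepB (total0 : Int) (st : Int × Int × Int) (c : Char) : Int × Int × Int :=
  if c = '0' then (st.1 + 1, st.2.1, st.2.2)
  else
    let zb := total0 - st.1
    let best := if zb > 0 ∧ zb + st.2.1 > st.2.2 then zb + st.2.1 else st.2.2
    (st.1, st.2.1 + 1, best)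

def secondsToRemoveOccurrences_alt (s : String) : Int :=
  let total0 : Int := s.toList.foldl (fun acc c => if c == '0' then acc + 1 else acc) 0
  (s.toList.reverse.foldl (pvStepB total0) (0, 0, 0)).2.2

-- ===== PRECONDITION & SPEC =====
def Spec_secondsToRemoveOccurrences (s : String) (out : Int) : Prop := out = secondsToRemoveOccurrences_alt s
instance (s : String) (out : Int) : Decidable (Spec_secondsToRemoveOccurrences s out) := by unfold Spec_secondsToRemoveOccurrences; infer_instance

-- ===== CLAIM (what is proved, stated in full; the proofs are below) =====
def Claim_equal_secondsToRemoveOccurrences : Prop := ∀ (s : String), Dom_secondsToRemoveOccurrences s → Spec_secondsToRemoveOccurrences s (secondsToRemoveOccurrences s)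

-- ===== LEMMAS AND PROOFS =====

-- zeros / non-zeros counts of a char list, as Int
def pvC0 : List Char → Int
  | [] => 0
  | c :: t => (if c = '0' then 1 else 0) + pvC0 t

def pvC1 : List Char → Int
  | [] => 0
  | c :: t => (if c = '0' then 0 else 1) + pvC1 t

-- the zeros-count recorded at each qualifying one, scanning left to right with z zeros already seen
def pvQs : Int → List Char → List Int
  | _, [] => []
  | z, c :: t => if c = '0' then pvQs (z + 1) t else if z > 0 then z :: pvQs z t else pvQs z t

-- closed-form maximum over such a list
def pvBmax : List Int → Int
  | [] => 0
  | z :: t => max (z + (t.length : Int)) (pvBmax t)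

-- best value computed by B's reversed scan, as a head recursion (head processed last)
def pvBest (T : Int) : List Char → Int
  | [] => 0
  | c :: t =>
      if c = '0' then pvBest T t
      else if T - pvC0 t > 0 ∧ (T - pvC0 t) + pvC1 t > pvBest T t then (T - pvC0 t) + pvC1 t
      else pvBest T t

lemma pvA_fold (l : List Char) (z m : Int) :
    (l.foldl pvStepA (z, m)).2 = (pvQs z l).foldl (fun m z => max (m + 1) z) m := by
  induction l generalizing z m with
  | nil => simp [pvQs]
  | cons c t ih =>
      by_cases h0 : c = '0'
      · simp [pvStepA, pvQs, h0, ih]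
      · by_cases hz : z > 0
        · simp [pvStepA, pvQs, h0, hz, ih]
        · simp [pvStepA, pvQs, h0, hz, ih]

lemma pvG_eq (zs : List Int) (m : Int) (hm : 0 ≤ m) :
    zs.foldl (fun m z => max (m + 1) z) m = max (m + zs.length) (pvBmax zs) := by
  induction zs generalizing m with
  | nil => simp [pvBmax]; omega
  | cons z t ih =>
      simp only [List.foldl_cons, pvBmax, List.length_cons]
      rw [ih (max (m + 1) z) (by omega)]
      push_cast
      omega

lemma pvQs_pos (l : List Char) (z : Int) (hz : 0 ≤ z) : ∀ x ∈ pvQs z l, 1 ≤ x := by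
  induction l generalizing z with
  | nil => simp [pvQs]
  | cons c t ih =>
      intro x hx
      by_cases h0 : c = '0'
      · exact ih (z + 1) (by omega) x (by simpa [pvQs, h0] using hx)
      · by_cases hzp : z > 0
        · simp [pvQs, h0, hzp] at hx
          rcases hx with rfl | hx
          · omega
          · exact ih z hz x hx
        · exact ih z hz x (by simpa [pvQs, h0, hzp] using hx)

lemma pvLen_le_bmax (zs : List Int) (h : ∀ x ∈ zs, 1 ≤ x) : (zs.length : Int) ≤ pvBmax zs := by
  induction zs with
  | nil => simp [pvBmax]
  | cons z t ih =>
      have hz : 1 ≤ z := h z (by simp)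
      have := ih (fun x hx => h x (by simp [hx]))
      simp only [pvBmax, List.length_cons]
      push_cast
      omega

lemma pvCount_fold (l : List Char) (a : Int) :
    l.foldl (fun acc c => if c == '0' then acc + 1 else acc) a = a + pvC0 l := by
  induction l generalizing a with
  | nil => simp [pvC0]
  | cons c t ih =>
      rw [List.foldl_cons, ih]
      by_cases h : c = '0' <;> simp [pvC0, h] <;> omega

lemma pvB_fold (T : Int) (l : List Char) :
    l.reverse.foldl (pvStepB T) (0, 0, 0) = (pvC0 l, pvC1 l, pvBest T l) := by
  rw [List.foldl_reverse]
  induction l with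
  | nil => simp [pvC0, pvC1, pvBest]
  | cons c t ih =>
      simp only [List.foldr_cons, ih]
      by_cases h0 : c = '0'
      · simp [pvStepB, pvC0, pvC1, pvBest, h0]; omega
      · simp [pvStepB, pvC0, pvC1, pvBest, h0]; omega

lemma pvQs_len (t : List Char) (z : Int) (hz : 0 < z) : ((pvQs z t).length : Int) = pvC1 t := by
  induction t generalizing z with
  | nil => simp [pvQs, pvC1]
  | cons c t ih =>
      by_cases h0 : c = '0'
      · simp [pvQs, pvC1, h0, ih (z + 1) (by omega)]
      · simp [pvQs, pvC1, h0, hz, ih z hz]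
        ring

lemma pvMain (l : List Char) (z : Int) (hz : 0 ≤ z) :
    pvBest (z + pvC0 l) l = pvBmax (pvQs z l) := by
  induction l generalizing z with
  | nil => simp [pvBest, pvQs, pvBmax]
  | cons c t ih =>
      by_cases h0 : c = '0'
      · have : z + pvC0 (c :: t) = (z + 1) + pvC0 t := by simp [pvC0, h0]; ring
        rw [this]
        simpa [pvBest, pvQs, h0] using ih (z + 1) (by omega)
      · have hc0 : pvC0 (c :: t) = pvC0 t := by simp [pvC0, h0]
        have hT : z + pvC0 (c :: t) - pvC0 t = z := by omega
        by_cases hzp : z > 0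
        · have hlen := pvQs_len t z hzp
          have hih := ih z hz
          have hb : pvBmax (pvQs z (c :: t)) = max (z + pvC1 t) (pvBmax (pvQs z t)) := by
            simp [pvQs, h0, hzp, pvBmax, hlen]
          rw [hb]
          simp [pvBest, h0, hc0, hih]
          split_ifs with h <;> omega
        · have hz0 : z = 0 := by omega
          subst hz0
          have hih := ih 0 le_rfl
          simpa [pvBest, pvQs, h0, hc0] using hih

-- ===== VERDICT (by name: the statement is the Claim_ definition above) =====
theorem secondsToRemoveOccurrences_spec : Claim_equal_secondsToRemoveOccurrences := by
  intro s _
  show secondsToRemoveOccurrences s = secondsToRemoveOccurrences_alt s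
  unfold secondsToRemoveOccurrences secondsToRemoveOccurrences_alt
  simp only [pvCount_fold, Int.zero_add, pvB_fold]
  rw [pvA_fold, pvG_eq _ 0 le_rfl]
  have hpos := pvQs_pos s.toList 0 le_rfl
  have hlen := pvLen_le_bmax (pvQs 0 s.toList) hpos
  have hmain := pvMain s.toList 0 le_rfl
  simp only [Int.zero_add] at hmain
  omega
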